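-- pv_equiv track=rewrite | github.com/Vezyno/PythonH-W | HW5.py | find_palindromic_primes
-- ===== SOURCE A (Python) =====
-- def sito_of_eratosthenes(limit):
--     is_prime = [True] * (limit + 1)
--     p = 2
--     while (p * p <= limit):
--         if (is_prime[p] == True):
--             for i in range(p * 2, limit + 1, p):
--                 is_prime[i] = False
--         p += 1
--     return [p for p in range(2, limit + 1) if is_prime[p]]
--
-- def find_palindromic_primes(n):
--     palindromic_primes = []
--     primes = sito_of_eratosthenes(n)
--     for prime in primes:
--         binary_representation = bin(prime)[2:]
--         if binary_representation == binary_representation[::-1]: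
--             palindromic_primes.append(prime)
--     return palindromic_primes
-- ===== SOURCE B (Python) =====
-- def _is_prime(k):
--     d = 2
--     while d * d <= k:
--         if k % d == 0:
--             return False
--         d += 1
--     return True
--
--
-- def _is_bin_palindrome(k):
--     bits = []
--     m = k
--     while m > 0:
--         bits.append(m % 2)
--         m //= 2
--     return bits == bits[::-1]
--
--
-- def find_palindromic_primes(n):
--     result = []
--     k = 2
--     while k <= n:
--         if _is_prime(k) and _is_bin_palindrome(k):
--             result.append(k)
--         k += 1
--     return result
-- ===== Notes on version B (the rewrite author's own statement) =====
-- stated objective: alternative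
-- what changed: Replaces the Eratosthenes sieve array + binary-string palindrome filter with a single pass over 2..n that tests each number by trial division and checks palindromicity on a numeric bit list (no sieve table, no string formatting).
import Mathlib
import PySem

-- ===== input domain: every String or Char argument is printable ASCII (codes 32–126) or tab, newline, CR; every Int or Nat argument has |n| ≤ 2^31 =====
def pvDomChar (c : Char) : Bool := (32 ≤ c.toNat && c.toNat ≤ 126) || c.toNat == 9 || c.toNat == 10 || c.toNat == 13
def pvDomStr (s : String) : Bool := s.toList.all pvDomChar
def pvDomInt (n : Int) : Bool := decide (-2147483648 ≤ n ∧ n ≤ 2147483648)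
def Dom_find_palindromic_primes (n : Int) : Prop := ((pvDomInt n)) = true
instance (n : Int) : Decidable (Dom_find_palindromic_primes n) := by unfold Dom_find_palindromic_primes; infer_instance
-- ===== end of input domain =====

-- B replaces A's Eratosthenes sieve + binary-string palindrome filter by a single pass with
-- trial-division primality and a numeric bit-list palindrome test (alternative algorithm, not faster).

-- ===== PORT A =====
-- bin(m)[2:] as a list of chars, MSB first (exact for m ≥ 1; A only applies it to primes, which are ≥ 2)
def pvBinA (m : Nat) : List Char :=
  if h : m = 0 then [] else pvBinA (m / 2) ++ [if m % 2 = 1 then '1' else '0']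
termination_by m
decreasing_by exact Nat.div_lt_self (Nat.pos_of_ne_zero h) (by norm_num)

-- inner loop 'for i in range(p*2, limit+1, p): is_prime[i] = False'
-- (every i here is ≥ 0 since p ≥ 2 at all call sites, so i.toNat is exact, and i < len(is_prime))
def pvMark (limit : Int) (p : Int) (arr : List Bool) : List Bool :=
  (PySem.List.pyRange (p * 2) (limit + 1) p).foldl (fun a i => a.set i.toNat false) arr

-- outer 'while p * p <= limit' loop (p ≥ 2 at every reachable call, so is_prime[p] is in range: getD is exact)
def pvSieveLoop (limit : Int) (p : Int) (arr : List Bool) : List Bool :=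
  if h : p * p ≤ limit then
    pvSieveLoop limit (p + 1) (if arr.getD p.toNat false = true then pvMark limit p arr else arr)
  else arr
termination_by (limit + 1 - p).toNat
decreasing_by
  by_cases hp : p ≤ 0
  · have h0 : (0:Int) ≤ p * p := mul_self_nonneg p
    have h1 : (0:Int) ≤ limit := le_trans h0 h
    omega
  · have h1 : p ≤ p * p := le_mul_of_one_le_left (by omega) (by omega)
    have h2 : p ≤ limit := le_trans h1 h
    omega

def sito_of_eratosthenes (limit : Int) : List Int :=
  let is_prime := List.replicate (limit + 1).toNat true
  let final := pvSieveLoop limit 2 is_prime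
  -- '[p for p in range(2, limit + 1) if is_prime[p]]' (every index p is in range, so getD is exact)
  (PySem.List.pyRange 2 (limit + 1) 1).filter (fun p => final.getD p.toNat false)

def find_palindromic_primes (n : Int) : List Int :=
  (sito_of_eratosthenes n).foldl
    (fun acc prime =>
      let b := pvBinA prime.toNat      -- binary_representation = bin(prime)[2:]
      if b = b.reverse then acc ++ [prime] else acc)  -- s[::-1] on a string is reversal
    []

-- ===== PORT B =====
-- '_is_prime': 'while d * d <= k: if k % d == 0: return False; d += 1' (all values ≥ 0: Nat arithmetic is exact)
def pvTrial (k : Nat) (d : Nat) : Bool :=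
  if h : d * d ≤ k then (if k % d = 0 then false else pvTrial k (d + 1)) else true
termination_by k + 1 - d
decreasing_by
  rcases Nat.eq_zero_or_pos d with hd | hd
  · omega
  · have h1 : d ≤ d * d := Nat.le_mul_of_pos_left d hd
    omega

def pvIsPrimeB (k : Nat) : Bool := pvTrial k 2

-- '_is_bin_palindrome': 'bits = []; while m > 0: bits.append(m % 2); m //= 2' — the bit list, LSB first
def pvBitsB (m : Nat) : List Nat :=
  if h : m = 0 then [] else m % 2 :: pvBitsB (m / 2)
termination_by m
decreasing_by exact Nat.div_lt_self (Nat.pos_of_ne_zero h) (by norm_num)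

def pvIsBinPalB (k : Nat) : Bool :=
  let bits := pvBitsB k
  decide (bits = bits.reverse)   -- 'bits == bits[::-1]'

-- 'k = 2; while k <= n: if _is_prime(k) and _is_bin_palindrome(k): result.append(k); k += 1'
-- (k ≥ 2 > 0 throughout, so k.toNat is exact)
def pvAltLoop (n : Int) (k : Int) : List Int :=
  if h : k ≤ n then
    (if pvIsPrimeB k.toNat && pvIsBinPalB k.toNat then [k] else []) ++ pvAltLoop n (k + 1)
  else []
termination_by (n + 1 - k).toNat
decreasing_by omega

def find_palindromic_primes_alt (n : Int) : List Int := pvAltLoop n 2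

-- ===== PRECONDITION & SPEC =====
def Spec_find_palindromic_primes (n : Int) (out : List Int) : Prop := out = find_palindromic_primes_alt n
instance (n : Int) (out : List Int) : Decidable (Spec_find_palindromic_primes n out) := by unfold Spec_find_palindromic_primes; infer_instance

-- ===== CLAIM (what is proved, stated in full; the proofs are below) =====
def Claim_equal_find_palindromic_primes : Prop := ∀ (n : Int), Dom_find_palindromic_primes n → Spec_find_palindromic_primes n (find_palindromic_primes n)

-- ===== LEMMAS AND PROOFS =====

-- ---------- palindrome test: A's binary string vs B's bit list ----------

def pvC (b : Nat) : Char := if b = 1 then '1' else '0'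
def pvD (c : Char) : Nat := if c = '1' then 1 else 0

lemma binA_eq_map_bits (m : Nat) : pvBinA m = ((pvBitsB m).map pvC).reverse := by
  fun_induction pvBinA m with
  | case1 => simp [pvBitsB]
  | case2 m h ih =>
    rw [pvBitsB]
    simp only [dif_neg h]
    rw [ih]
    simp [pvC]

lemma bits01 (m : Nat) : ∀ x ∈ pvBitsB m, x = 0 ∨ x = 1 := by
  fun_induction pvBitsB m with
  | case1 => simp
  | case2 m h ih =>
    simp only [List.mem_cons]
    rintro x (rfl | hx)
    · omega
    · exact ih x hx

lemma map_pvD_pvC (l : List Nat) (h : ∀ x ∈ l, x = 0 ∨ x = 1) : (l.map pvC).map pvD = l := by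
  induction l with
  | nil => rfl
  | cons a t ih =>
    have ha := h a (by simp)
    simp only [List.map_cons, ih (fun x hx => h x (by simp [hx])), List.cons.injEq, and_true]
    rcases ha with rfl | rfl <;> rfl

lemma pal_agree (k : Nat) :
    decide (pvBinA k = (pvBinA k).reverse) = pvIsBinPalB k := by
  unfold pvIsBinPalB
  rw [decide_eq_decide]
  rw [binA_eq_map_bits, List.reverse_reverse, ← List.map_reverse]
  constructor
  · intro h
    have h' := congrArg (List.map pvD) h
    rw [map_pvD_pvC _ (fun x hx => bits01 k x (List.mem_reverse.mp hx)),
        map_pvD_pvC _ (bits01 k)] at h'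
    exact h'.symm
  · intro h
    rw [← h]

-- ---------- trial division ----------

lemma trial_iff (k d : Nat) :
    pvTrial k d = true ↔ ∀ e, d ≤ e → e * e ≤ k → ¬ e ∣ k := by
  fun_induction pvTrial k d with
  | case1 d hdk hmod =>
    simp only [Bool.false_eq_true, false_iff]
    intro h
    exact h d le_rfl hdk (Nat.dvd_of_mod_eq_zero hmod)
  | case2 d hdk hmod ih =>
    rw [ih]
    constructor
    · intro h e hde hek
      rcases Nat.eq_or_lt_of_le hde with rfl | hlt
      · exact fun hdvd => hmod (Nat.dvd_iff_mod_eq_zero.mp hdvd)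
      · exact h e hlt hek
    · intro h e hde hek
      exact h e (by omega) hek
  | case3 d hdk =>
    constructor
    · intro _ e hde hek _
      exact absurd (le_trans (Nat.mul_le_mul hde hde) hek) hdk
    · intro _
      rfl

-- a composite k ≥ 2 has a prime divisor q with q*q ≤ k and 2*q ≤ k
lemma composite_small_factor {k : Nat} (h2 : 2 ≤ k) (hnp : ¬ Nat.Prime k) :
    ∃ q : Nat, Nat.Prime q ∧ q ∣ k ∧ q * q ≤ k ∧ 2 * q ≤ k := by
  have hq := Nat.minFac_prime (show k ≠ 1 by omega)
  refine ⟨k.minFac, hq, Nat.minFac_dvd k, ?_, ?_⟩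
  · have h := Nat.minFac_sq_le_self (by omega) hnp
    rwa [pow_two] at h
  · rcases Nat.minFac_dvd k with ⟨m, hm⟩
    have hm2 : 2 ≤ m := by
      by_contra hlt
      have hlt' : m < 2 := by omega
      interval_cases m
      · simp at hm; omega
      · rw [Nat.mul_one] at hm
        exact hnp (by rw [hm]; exact hq)
    calc 2 * k.minFac ≤ m * k.minFac := Nat.mul_le_mul_right _ hm2
      _ = k := by rw [Nat.mul_comm]; exact hm.symm

lemma trial_eq_prime (k : Nat) (h2 : 2 ≤ k) : pvIsPrimeB k = decide (Nat.Prime k) := by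
  unfold pvIsPrimeB
  by_cases hp : Nat.Prime k
  · simp only [hp, decide_true]
    rw [trial_iff]
    intro e h2e hek hdvd
    rcases hp.eq_one_or_self_of_dvd e hdvd with rfl | he
    · omega
    · have h2k := hp.two_le
      have h2kk : 2 * k ≤ k * k := Nat.mul_le_mul_right k h2k
      rw [he] at hek
      omega
  · simp only [hp, decide_false]
    rw [← Bool.not_eq_true, trial_iff]
    intro h
    obtain ⟨q, hq, hdvd, hsq, -⟩ := composite_small_factor h2 hp
    exact h q hq.two_le hsq hdvd

-- ---------- sieve correctness ----------

lemma foldl_set_length (L : List Int) (arr : List Bool) :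
    (L.foldl (fun a i => a.set i.toNat false) arr).length = arr.length := by
  induction L generalizing arr with
  | nil => rfl
  | cons i t ih => simp [List.foldl_cons, ih]

lemma foldl_set_getD (L : List Int) (arr : List Bool) (j : Nat) :
    ((L.foldl (fun a i => a.set i.toNat false) arr).getD j false = false ↔
      ((∃ i ∈ L, i.toNat = j) ∧ j < arr.length) ∨ arr.getD j false = false) := by
  induction L generalizing arr with
  | nil => simp
  | cons i t ih =>
    rw [List.foldl_cons, ih]
    have hset : (arr.set i.toNat false).getD j false = false ↔
        (i.toNat = j ∧ j < arr.length) ∨ arr.getD j false = false := by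
      rw [List.getD_eq_getElem?_getD, List.getD_eq_getElem?_getD, List.getElem?_set]
      by_cases hm : i.toNat = j
      · subst hm
        by_cases hr : i.toNat < arr.length
        · simp [hr]
        · simp only [if_neg hr]
          rw [List.getElem?_eq_none (by omega)]
          simp [hr]
      · simp [hm]
    rw [List.length_set, hset]
    constructor
    · rintro (⟨⟨x, hx, rfl⟩, hlen⟩ | h)
      · exact Or.inl ⟨⟨x, by simp [hx], rfl⟩, hlen⟩
      · rcases h with ⟨rfl, hlen⟩ | h
        · exact Or.inl ⟨⟨i, by simp, rfl⟩, hlen⟩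
        · exact Or.inr h
    · rintro (⟨⟨x, hx, rfl⟩, hlen⟩ | h)
      · rcases List.mem_cons.mp hx with rfl | hx'
        · exact Or.inr (Or.inl ⟨rfl, hlen⟩)
        · exact Or.inl ⟨⟨x, hx', rfl⟩, hlen⟩
      · exact Or.inr (Or.inr h)

lemma mark_length (limit p : Int) (arr : List Bool) :
    (pvMark limit p arr).length = arr.length := foldl_set_length _ _

lemma mark_getD (limit p : Int) (hp : 2 ≤ p) (arr : List Bool) (j : Nat)
    (hlen : (arr.length : Int) = limit + 1) :
    ((pvMark limit p arr).getD j false = false ↔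
      ((p ∣ (j : Int) ∧ 2 * p ≤ (j : Int) ∧ j < arr.length) ∨ arr.getD j false = false)) := by
  unfold pvMark
  rw [foldl_set_getD]
  constructor
  · rintro (⟨⟨i, hi, rfl⟩, hjlen⟩ | h)
    · rw [PySem.List.mem_pyRange_iff_of_pos (by omega : (0:Int) < p)] at hi
      obtain ⟨h1, h2, h3⟩ := hi
      have hi0 : (0:Int) ≤ i := by omega
      have hcast : ((i.toNat : Int)) = i := Int.toNat_of_nonneg hi0
      have hpi : p ∣ i := by
        have h4 := dvd_add h3 (dvd_mul_right p 2)
        simpa using h4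
      refine Or.inl ⟨by rw [hcast]; exact hpi, by omega, hjlen⟩
    · exact Or.inr h
  · rintro (⟨hdvd, hle, hjlen⟩ | h)
    · refine Or.inl ⟨⟨(j : Int), ?_, by simp⟩, hjlen⟩
      rw [PySem.List.mem_pyRange_iff_of_pos (by omega : (0:Int) < p)]
      refine ⟨by omega, by omega, ?_⟩
      exact dvd_sub hdvd (dvd_mul_right p 2)
    · exact Or.inr h

-- the loop invariant: cell j is false exactly when some prime < p properly divides j
def pvGood (limit : Int) (p : Int) (arr : List Bool) : Prop :=
  (arr.length : Int) = limit + 1 ∧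
  ∀ j : Nat, j < arr.length →
    (arr.getD j false = false ↔ ∃ q : Nat, Nat.Prime q ∧ (q : Int) < p ∧ q ∣ j ∧ 2 * q ≤ j)

lemma sieve_spec (limit p : Int) (arr : List Bool) : 2 ≤ p → pvGood limit p arr →
    ∀ j : Nat, j < arr.length →
      ((pvSieveLoop limit p arr).getD j false = false ↔
        ∃ q : Nat, Nat.Prime q ∧ ((q : Int) < p ∨ (q : Int) * q ≤ limit) ∧ q ∣ j ∧ 2 * q ≤ j) := by
  fun_induction pvSieveLoop limit p arr with
  | case1 p arr hcond ih =>
    intro hp hg j hj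
    obtain ⟨hlen, hinv⟩ := hg
    have hq0 : (0:Int) ≤ p := by omega
    have hpp' : p ≤ p * p := le_mul_of_one_le_left (by omega) (by omega)
    have hplim : p ≤ limit := le_trans hpp' hcond
    have hplen : p.toNat < arr.length := by omega
    have hbit : arr.getD p.toNat false = true → Nat.Prime p.toNat := by
      intro htrue
      by_contra hnp
      obtain ⟨q, hq, hdvd, hsq, h2q⟩ := composite_small_factor (show 2 ≤ p.toNat by omega) hnp
      have hq2 := hq.two_le
      have h2qq : 2 * q ≤ q * q := Nat.mul_le_mul_right q hq2
      have hqlt : (q : Int) < p := by omega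
      have hmk := (hinv p.toNat hplen).mpr ⟨q, hq, hqlt, hdvd, h2q⟩
      rw [htrue] at hmk
      exact Bool.noConfusion hmk
    have hprime_bit : Nat.Prime p.toNat → arr.getD p.toNat false = true := by
      intro hprime
      by_contra hfalse
      have hf : arr.getD p.toNat false = false := by
        cases hv : arr.getD p.toNat false
        · rfl
        · exact absurd hv hfalse
      obtain ⟨r, hr, hrlt, hrdvd, h2r⟩ := (hinv p.toNat hplen).mp hf
      rcases hprime.eq_one_or_self_of_dvd r hrdvd with rfl | rfl
      · exact Nat.not_prime_one hr
      · omega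
    have hg' : pvGood limit (p + 1)
        (if arr.getD p.toNat false = true then pvMark limit p arr else arr) := by
      by_cases hb : arr.getD p.toNat false = true
      · have hpp := hbit hb
        rw [if_pos hb]
        refine ⟨by rw [mark_length]; exact hlen, ?_⟩
        intro j' hj'
        rw [mark_length] at hj'
        rw [mark_getD limit p hp arr j' hlen, hinv j' hj']
        constructor
        · rintro (⟨hdvd, hle2, -⟩ | ⟨q, hq, hqlt, hdvd, h2q⟩)
          · refine ⟨p.toNat, hpp, by omega, ?_, by omega⟩
            have hd : ((p.toNat : Int)) ∣ (j' : Int) := by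
              rwa [Int.toNat_of_nonneg hq0]
            exact_mod_cast hd
          · exact ⟨q, hq, by omega, hdvd, h2q⟩
        · rintro ⟨q, hq, hqlt, hdvd, h2q⟩
          by_cases hqp : q = p.toNat
          · subst hqp
            refine Or.inl ⟨?_, by omega, hj'⟩
            have hd : ((p.toNat : Int)) ∣ ((j' : Nat) : Int) := Int.natCast_dvd_natCast.mpr hdvd
            rwa [Int.toNat_of_nonneg hq0] at hd
          · refine Or.inr ⟨q, hq, by omega, hdvd, h2q⟩
      · rw [if_neg hb]
        refine ⟨hlen, ?_⟩
        intro j' hj'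
        rw [hinv j' hj']
        constructor
        · rintro ⟨q, hq, hqlt, hdvd, h2q⟩
          exact ⟨q, hq, by omega, hdvd, h2q⟩
        · rintro ⟨q, hq, hqlt, hdvd, h2q⟩
          by_cases hqp : q = p.toNat
          · subst hqp
            exact absurd (hprime_bit hq) hb
          · exact ⟨q, hq, by omega, hdvd, h2q⟩
    simp only [dite_eq_ite] at ih
    have hlen' : j < (if arr.getD p.toNat false = true then pvMark limit p arr else arr).length := by
      by_cases hb : arr.getD p.toNat false = true
      · rw [if_pos hb, mark_length]; exact hj
      · rw [if_neg hb]; exact hj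
    rw [ih (by omega) hg' j hlen']
    constructor
    · rintro ⟨q, hq, hqor, hdvd, h2q⟩
      refine ⟨q, hq, ?_, hdvd, h2q⟩
      rcases hqor with hqlt | hqsq
      · by_cases hqp : (q : Int) = p
        · right
          rw [hqp]
          exact hcond
        · left
          omega
      · right
        exact hqsq
    · rintro ⟨q, hq, hqor, hdvd, h2q⟩
      refine ⟨q, hq, ?_, hdvd, h2q⟩
      rcases hqor with hqlt | hqsq
      · left; omega
      · right; exact hqsq
  | case2 p arr hcond =>
    intro hp hg j hj
    obtain ⟨hlen, hinv⟩ := hg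
    rw [hinv j hj]
    constructor
    · rintro ⟨q, hq, hqlt, hdvd, h2q⟩
      exact ⟨q, hq, Or.inl hqlt, hdvd, h2q⟩
    · rintro ⟨q, hq, hqor, hdvd, h2q⟩
      rcases hqor with hqlt | hqsq
      · exact ⟨q, hq, hqlt, hdvd, h2q⟩
      · refine ⟨q, hq, ?_, hdvd, h2q⟩
        by_contra hge
        have hge' : p ≤ (q : Int) := by omega
        have h2q' : (2:Int) ≤ (q : Int) := by exact_mod_cast hq.two_le
        have hmul : p * p ≤ (q : Int) * q := mul_le_mul hge' hge' (by omega) (by omega)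
        exact hcond (le_trans hmul hqsq)

lemma sieveBit_eq (n : Int) (k : Nat) (h2 : 2 ≤ k) (hkn : (k : Int) ≤ n) :
    (pvSieveLoop n 2 (List.replicate (n + 1).toNat true)).getD k false = decide (Nat.Prime k) := by
  have hn2 : (2:Int) ≤ n := le_trans (by exact_mod_cast h2) hkn
  have hlenN : ((List.replicate (n + 1).toNat true).length : Int) = n + 1 := by
    rw [List.length_replicate]; omega
  have hg : pvGood n 2 (List.replicate (n + 1).toNat true) := by
    refine ⟨hlenN, ?_⟩
    intro j hj
    rw [List.length_replicate] at hj
    rw [List.getD_eq_getElem?_getD, List.getElem?_replicate, if_pos hj]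
    simp only [Option.getD_some]
    constructor
    · intro h
      exact Bool.noConfusion h
    · rintro ⟨q, hq, hqlt, -, -⟩
      have := hq.two_le
      exfalso
      omega
  have hklen : k < (List.replicate (n + 1).toNat true).length := by
    rw [List.length_replicate]; omega
  have hiff := sieve_spec n 2 _ le_rfl hg k hklen
  by_cases hp : Nat.Prime k
  · simp only [hp, decide_true]
    by_contra hne
    have hf : (pvSieveLoop n 2 (List.replicate (n + 1).toNat true)).getD k false = false := by
      cases hv : (pvSieveLoop n 2 (List.replicate (n + 1).toNat true)).getD k false
      · rfl
      · exact absurd hv hne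
    obtain ⟨q, hq, hqor, hdvd, h2q⟩ := hiff.mp hf
    rcases hp.eq_one_or_self_of_dvd q hdvd with rfl | rfl
    · exact Nat.not_prime_one hq
    · omega
  · simp only [hp, decide_false]
    obtain ⟨q, hq, hdvd, hsq, h2q⟩ := composite_small_factor h2 hp
    refine hiff.mpr ⟨q, hq, Or.inr ?_, hdvd, h2q⟩
    have hc : ((q * q : Nat) : Int) ≤ (k : Int) := by exact_mod_cast hsq
    push_cast at hc
    exact le_trans hc hkn

-- ---------- loop shapes ----------

lemma altLoop_eq (n : Int) : ∀ k : Int, pvAltLoop n k =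
    (PySem.List.pyRange k (n + 1) 1).filter (fun i => pvIsPrimeB i.toNat && pvIsBinPalB i.toNat) := by
  intro k
  fun_induction pvAltLoop n k with
  | case1 k hk ih =>
    rw [PySem.List.pyRange_one_cons (by omega : k < n + 1), List.filter_cons, ih]
    by_cases hc : (pvIsPrimeB k.toNat && pvIsBinPalB k.toNat) = true
    · simp [hc]
    · simp [hc]
  | case2 k hk =>
    rw [PySem.List.pyRange_one_eq_nil (by omega)]
    simp

-- ===== VERDICT (by name: the statement is the Claim_ definition above) =====
theorem find_palindromic_primes_spec : Claim_equal_find_palindromic_primes := by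
  intro n _
  unfold Spec_find_palindromic_primes find_palindromic_primes_alt
  rw [altLoop_eq]
  simp only [find_palindromic_primes, sito_of_eratosthenes]
  rw [PySem.List.foldl_append_ite_eq_filter]
  rw [List.nil_append, List.filter_filter]
  apply List.filter_congr
  intro i hi
  rw [PySem.List.mem_pyRange_one] at hi
  have h2 : 2 ≤ i.toNat := by omega
  have hle : ((i.toNat : Nat) : Int) ≤ n := by omega
  rw [pal_agree, sieveBit_eq n i.toNat h2 hle, ← trial_eq_prime i.toNat h2]
  exact Bool.and_comm _ _
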